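-- pv_equiv track=rewrite | github.com/mpacione/declarative | experiments/03-design-md/generator.py | _collapse_fingerprint
-- ===== SOURCE A (Python) =====
-- def _collapse_fingerprint(tokens: list[str]) -> tuple[str, ...]:
--     """Collapse contiguous anonymous runs to `Type×N`.
--
--     Anonymous tokens look like ``<FRAME>`` / ``<RECTANGLE>``; named
--     components stay verbatim.
--     """
--     collapsed: list[str] = []
--     i = 0
--     while i < len(tokens):
--         token = tokens[i]
--         if token.startswith("<") and token.endswith(">"):
--             # Count the run of the same anonymous type.
--             run = 1
--             while i + run < len(tokens) and tokens[i + run] == token: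
--                 run += 1
--             if run == 1:
--                 collapsed.append(token.strip("<>"))
--             else:
--                 collapsed.append(f"{token.strip('<>')} x{run}")
--             i += run
--         else:
--             collapsed.append(token)
--             i += 1
--     return tuple(collapsed)
-- ===== SOURCE B (Python) =====
-- def _collapse_fingerprint(tokens: list[str]) -> tuple[str, ...]:
--     """Collapse contiguous anonymous runs to `Type xN` (boundary-index version).
--
--     Instead of scanning runs, first compute the start index of every maximal
--     run by comparing adjacent elements, then derive each run length by index
--     arithmetic and render each (start, end) segment.
--     """
--     n = len(tokens)
--     starts = [i for i in range(n) if i == 0 or tokens[i] != tokens[i - 1]]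
--     out: list[str] = []
--     for s, e in zip(starts, starts[1:] + [n]):
--         t = tokens[s]
--         r = e - s
--         if t.startswith("<") and t.endswith(">"):
--             base = t.strip("<>")
--             out.append(base if r == 1 else f"{base} x{r}")
--         else:
--             out.extend([t] * r)
--     return tuple(out)
-- ===== Notes on version B (the rewrite author's own statement) =====
-- stated objective: alternative
-- what changed: Replaced A's nested while-loop run counting with a staged boundary-index algorithm: one comprehension collects the start index of every maximal run by comparing adjacent elements, then zipped (start, next-start-or-n) pairs give each run's token and length by index arithmetic.
import Mathlib
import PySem

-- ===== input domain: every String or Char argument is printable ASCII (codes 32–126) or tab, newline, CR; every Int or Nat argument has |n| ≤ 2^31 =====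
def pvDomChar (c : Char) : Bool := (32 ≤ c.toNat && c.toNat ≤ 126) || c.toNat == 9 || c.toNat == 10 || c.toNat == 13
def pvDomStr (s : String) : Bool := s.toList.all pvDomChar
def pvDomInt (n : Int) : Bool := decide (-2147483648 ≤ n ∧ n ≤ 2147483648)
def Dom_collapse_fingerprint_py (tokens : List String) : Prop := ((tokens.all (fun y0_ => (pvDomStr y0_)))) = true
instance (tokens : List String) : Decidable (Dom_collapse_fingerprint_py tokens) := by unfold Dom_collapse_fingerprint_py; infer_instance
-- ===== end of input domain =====

-- B replaces A's index/while run-scanning loop by a staged boundary-index algorithm: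
-- first collect the start index of every maximal run by comparing adjacent elements,
-- then render each (start, end) segment by index arithmetic; objective: alternative (same cost).


-- ===== PORT A =====
-- inner `while i + run < len(tokens) and tokens[i+run] == token: run += 1`
-- counted over the suffix after position i (index loop rendered as suffix recursion)
def pvRunA (token : String) : List String → Nat
  | [] => 0
  | t :: ts => if t == token then 1 + pvRunA token ts else 0

-- the outer `while i < len(tokens)` loop, state = accumulator `collapsed`
def pvLoopA (acc : List String) (l : List String) : List String :=
  match l with
  | [] => acc
  | token :: rest =>
    if PySem.Str.startswith token "<" && PySem.Str.endswith token ">" then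
      let run := 1 + pvRunA token rest
      let acc' := if run == 1 then acc ++ [PySem.Str.stripChars token "<>"]
        else acc ++ [PySem.Str.stripChars token "<>" ++ " x" ++ PySem.Int.toStr (run : Int)]
      pvLoopA acc' (rest.drop (pvRunA token rest))
    else
      pvLoopA (acc ++ [token]) rest
termination_by l.length
decreasing_by
  · simpa using Nat.lt_succ_of_le (List.length_drop_le ..)
  · simp

def collapse_fingerprint_py (tokens : List String) : List String :=
  pvLoopA [] tokens

-- ===== PORT B =====
-- `starts = [i for i in range(n) if i == 0 or tokens[i] != tokens[i-1]]`
-- (all accessed indices are in range, so total List.getD is exact here)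
def pvStarts (tokens : List String) : List Nat :=
  (List.range tokens.length).filter
    (fun i => i == 0 || !(tokens.getD i "" == tokens.getD (i - 1) ""))

-- the body of B's for-loop for one (start token, run length) segment
def pvChunkB (key : String) (r : Nat) : List String :=
  if PySem.Str.startswith key "<" && PySem.Str.endswith key ">" then
    let base := PySem.Str.stripChars key "<>"
    [if r == 1 then base else base ++ " x" ++ PySem.Int.toStr (r : Int)]
  else
    List.replicate r key

-- `for s, e in zip(starts, starts[1:] + [n]): …`
def collapse_fingerprint_py_alt (tokens : List String) : List String :=
  let starts := pvStarts tokens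
  (starts.zip (starts.drop 1 ++ [tokens.length])).flatMap
    (fun p => pvChunkB (tokens.getD p.1 "") (p.2 - p.1))

-- ===== PRECONDITION & SPEC =====
def Spec_collapse_fingerprint_py (tokens : List String) (out : List String) : Prop := out = collapse_fingerprint_py_alt tokens
instance (tokens : List String) (out : List String) : Decidable (Spec_collapse_fingerprint_py tokens out) := by unfold Spec_collapse_fingerprint_py; infer_instance

-- ===== CLAIM (what is proved, stated in full; the proofs are below) =====
def Claim_equal_collapse_fingerprint_py : Prop := ∀ (tokens : List String), Dom_collapse_fingerprint_py tokens → Spec_collapse_fingerprint_py tokens (collapse_fingerprint_py tokens)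

-- ===== LEMMAS AND PROOFS =====

-- Proof-side normal form shared by both ports: the list of maximal (token, run) groups.
def pvGroups : List String → List (String × Nat)
  | [] => []
  | x :: xs =>
    (x, 1 + (xs.takeWhile (· == x)).length) :: pvGroups (xs.dropWhile (· == x))
termination_by l => l.length
decreasing_by simpa using Nat.lt_succ_of_le (List.length_dropWhile_le ..)

def pvG (tokens : List String) : List String :=
  (pvGroups tokens).flatMap (fun g => pvChunkB g.1 g.2)

-- ---- A-side: pvLoopA = pvG ----
lemma pvRunA_eq_takeWhile (token : String) (l : List String) :
    pvRunA token l = (l.takeWhile (· == token)).length := by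
  induction l with
  | nil => rfl
  | cons t ts ih =>
    by_cases h : t == token <;>
      simp [pvRunA, List.takeWhile, h, ih, Nat.add_comm]

lemma pvDrop_runA (token : String) (l : List String) :
    l.drop (pvRunA token l) = l.dropWhile (· == token) := by
  induction l with
  | nil => rfl
  | cons t ts ih =>
    by_cases h : t == token
    · simpa [pvRunA, List.dropWhile, h, Nat.add_comm 1 (pvRunA token ts)] using ih
    · simp [pvRunA, List.dropWhile, h]

lemma pvG_cons_named (x : String) (xs : List String)
    (hx : (PySem.Str.startswith x "<" && PySem.Str.endswith x ">") = false) :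
    pvG (x :: xs) = x :: pvG xs := by
  have hx' : ¬ (PySem.Chars.startswith x.toList ['<'] = true ∧
      PySem.Chars.endswith x.toList ['>'] = true) := by
    simpa [Bool.and_eq_true] using hx
  have hrep : ∀ n : ℕ, List.replicate (1 + n) x = x :: List.replicate n x := by
    intro n; rw [Nat.add_comm]; simp [List.replicate_succ]
  cases xs with
  | nil => simp [pvG, pvGroups, pvChunkB, hx']
  | cons y ys =>
    by_cases h : y == x
    · have hyx : y = x := by simpa using h
      subst hyx
      simp [pvG, pvGroups, pvChunkB, hx', h,
        List.takeWhile, List.dropWhile, hrep, List.replicate_succ]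
    · simp [pvG, pvGroups, pvChunkB, hx', h,
        List.takeWhile, List.dropWhile, hrep]

lemma pvG_cons_run (token : String) (rest : List String) :
    pvG (token :: rest) =
      pvChunkB token (1 + (rest.takeWhile (· == token)).length) ++
        pvG (rest.dropWhile (· == token)) := by
  simp [pvG, pvGroups]

lemma pvLoopA_eq_pvG : ∀ (n : ℕ) (l : List String), l.length ≤ n →
    ∀ acc : List String, pvLoopA acc l = acc ++ pvG l := by
  intro n
  induction n with
  | zero =>
    intro l hl acc
    have hnil : l = [] := by cases l <;> simp_all
    subst hnil
    simp [pvLoopA, pvG, pvGroups]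
  | succ n ih =>
    intro l hl acc
    cases l with
    | nil => simp [pvLoopA, pvG, pvGroups]
    | cons token rest =>
      rw [pvLoopA]
      by_cases hanon : (PySem.Str.startswith token "<" && PySem.Str.endswith token ">") = true
      · rw [if_pos hanon]
        have hlen : (rest.drop (pvRunA token rest)).length ≤ n := by
          have hd : (rest.drop (pvRunA token rest)).length = rest.length - pvRunA token rest := by
            simp
          simp at hl; omega
        rw [ih _ hlen, pvG_cons_run, pvDrop_runA, pvChunkB, if_pos hanon,
          pvRunA_eq_takeWhile]
        split_ifs with hone
        · simp [hone]
        · simp [hone]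
      · rw [if_neg hanon]
        have hlen : rest.length ≤ n := by simp at hl; omega
        rw [ih _ hlen, pvG_cons_named token rest (by simpa using hanon)]
        simp

-- ---- B-side: collapse_fingerprint_py_alt = pvG ----

-- boundary predicate inside the tail: does a new run start at index j+1 of (x :: xs)?
def pvQ (x : String) (xs : List String) (j : Nat) : Bool :=
  !((x :: xs).getD (j + 1) "" == (x :: xs).getD j "")

def pvS' (x : String) (xs : List String) : List Nat :=
  ((List.range xs.length).filter (pvQ x xs)).map (· + 1)

lemma pvStarts_cons (x : String) (xs : List String) :
    pvStarts (x :: xs) = 0 :: pvS' x xs := by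
  simp only [pvStarts, List.length_cons, List.range_succ_eq_map, List.filter_cons,
    List.filter_map, pvS']
  simp only [beq_self_eq_true, Bool.true_or, if_true, List.cons.injEq, true_and]
  have hfil := List.filter_congr (l := List.range xs.length)
    (p := (fun i => i == 0 || !(x :: xs).getD i "" == (x :: xs).getD (i - 1) "") ∘ Nat.succ)
    (q := pvQ x xs) (fun j _ => by simp [pvQ, List.getD, Function.comp_def])
  rw [hfil]

lemma pvS'_cons (x y : String) (ys : List String) :
    pvS' x (y :: ys) =
      if y == x then (pvS' x ys).map (· + 1)
      else 1 :: (pvS' y ys).map (· + 1) := by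
  have hqs : ∀ j, pvQ x (y :: ys) (j + 1) = pvQ y ys j := by
    intro j; simp [pvQ]
  by_cases h : y == x
  · have hyx : y = x := by simpa using h
    subst hyx
    rw [if_pos (by simp)]
    have hq0 : pvQ y (y :: ys) 0 = false := by simp [pvQ]
    have hcmp : ∀ j, pvQ y (y :: ys) (Nat.succ j) = pvQ y ys j := fun j => hqs j
    simp only [pvS', List.length_cons, List.range_succ_eq_map, List.filter_cons,
      List.filter_map, hq0, Bool.false_eq_true, if_false, Function.comp_def, hcmp,
      List.map_map]
  · rw [if_neg (by simpa using h)]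
    have hq0 : pvQ x (y :: ys) 0 = true := by simp [pvQ, h]
    have hcmp : ∀ j, pvQ x (y :: ys) (Nat.succ j) = pvQ y ys j := fun j => hqs j
    simp only [pvS', List.length_cons, List.range_succ_eq_map, List.filter_cons,
      List.filter_map, hq0, if_true, Function.comp_def, hcmp, List.map_cons,
      List.map_map, List.cons.injEq]

lemma pvS'_replicate (x : String) (rest : List String) :
    ∀ k : ℕ, pvS' x (List.replicate k x ++ rest) = (pvS' x rest).map (· + k) := by
  intro k
  induction k with
  | zero => simp
  | succ k ih =>
    have h : List.replicate (k + 1) x ++ rest = x :: (List.replicate k x ++ rest) := by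
      simp [List.replicate_succ]
    rw [h, pvS'_cons, if_pos (by simp), ih, List.map_map]
    apply List.map_congr_left; intro a _; simp [Function.comp]; omega

lemma pvGetD_shift (l r : List String) (j : Nat) :
    (l ++ r).getD (j + l.length) "" = r.getD j "" := by
  simp [List.getD, List.getElem?_append_right (Nat.le_add_left _ _)]

-- rendering helper: B's zip/flatMap pass, abstracted over the starts list and n
def pvRender (tokens : List String) (starts : List Nat) (n : Nat) : List String :=
  (starts.zip (starts.drop 1 ++ [n])).flatMap
    (fun p => pvChunkB (tokens.getD p.1 "") (p.2 - p.1))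

lemma pvAlt_eq_render (tokens : List String) :
    collapse_fingerprint_py_alt tokens = pvRender tokens (pvStarts tokens) tokens.length := rfl

lemma pvTakeWhile_replicate (x : String) (xs : List String) :
    xs.takeWhile (· == x) = List.replicate (xs.takeWhile (· == x)).length x := by
  apply List.eq_replicate_of_mem
  intro b hb
  have hpb := List.mem_takeWhile_imp (p := (· == x)) hb
  exact eq_of_beq hpb

lemma pvDropWhile_head (x y : String) (xs ys : List String)
    (h : xs.dropWhile (· == x) = y :: ys) : (y == x) = false := by
  have := List.head?_dropWhile_not (· == x) xs
  rw [h] at this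
  simpa using this

lemma pvRender_eq_pvG : ∀ (n : ℕ) (l : List String), l.length ≤ n →
    pvRender l (pvStarts l) l.length = pvG l := by
  intro n
  induction n with
  | zero =>
    intro l hl
    have hnil : l = [] := by cases l <;> simp_all
    subst hnil
    simp [pvRender, pvStarts, pvG, pvGroups]
  | succ n ih =>
    intro l hl
    cases l with
    | nil => simp [pvRender, pvStarts, pvG, pvGroups]
    | cons x xs =>
      -- run decomposition: x :: xs = replicate (k'+1) x ++ rest
      set k' := (xs.takeWhile (· == x)).length with hk'
      set rest := xs.dropWhile (· == x) with hrest
      have hxs : xs = List.replicate k' x ++ rest := by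
        conv_lhs => rw [← List.takeWhile_append_dropWhile (p := (· == x)) (l := xs)]
        rw [pvTakeWhile_replicate, ← hk', ← hrest]
      have htok : x :: xs = List.replicate (k' + 1) x ++ rest := by
        rw [hxs, List.replicate_succ, List.cons_append]
      have hstarts : pvStarts (x :: xs) = 0 :: (pvS' x rest).map (· + k') := by
        rw [pvStarts_cons, hxs, pvS'_replicate]
      have hG : pvG (x :: xs) = pvChunkB x (1 + k') ++ pvG rest := by
        rw [pvG_cons_run, ← hk', ← hrest]
      have hlenxs : xs.length = k' + rest.length := by rw [hxs]; simp
      cases hre : rest with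
      | nil =>
        have hS : pvS' x rest = [] := by rw [hre]; simp [pvS']
        have hxlen : xs.length = k' := by rw [hlenxs, hre]; simp
        rw [hstarts, hS, hG, hre]
        simp only [List.map_nil, pvRender, List.drop_one, List.tail_cons,
          List.nil_append, List.zip_cons_cons, List.zip_nil_left, List.zip_nil_right,
          List.flatMap_cons, List.flatMap_nil, List.append_nil, pvG, pvGroups,
          List.flatMap_nil]
        rw [show (x :: xs).length = k' + 1 by simp [hxlen]]
        simp [Nat.add_comm 1 k', List.getD]
      | cons y ys =>
        have hyx : (y == x) = false := pvDropWhile_head x y xs ys (by rw [← hrest, hre])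
        have hrlen : rest.length ≤ n := by
          have hd := List.length_dropWhile_le (p := (· == x)) (l := xs)
          rw [← hrest] at hd
          simp at hl; omega
        have hSrest : pvS' x rest = (pvStarts rest).map (· + 1) := by
          rw [hre, pvS'_cons, if_neg (by simp [hyx]), pvStarts_cons]
          simp
        have hstarts' : pvStarts (x :: xs)
            = 0 :: (pvStarts rest).map (· + (k' + 1)) := by
          rw [hstarts, hSrest, List.map_map]
          congr 1
          apply List.map_congr_left; intro a _; simp [Function.comp]; omega
        set k := k' + 1 with hkdef
        set S := pvS' y ys with hSdef
        have hpr : pvStarts rest = 0 :: S := by rw [hre, pvStarts_cons]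
        have hn : (x :: xs).length = rest.length + k := by
          simp [List.length_cons, hlenxs]; omega
        have hzip :
            ((0 :: (pvStarts rest).map (· + k)).zip
              (((0 :: (pvStarts rest).map (· + k)).drop 1) ++ [(x :: xs).length]))
            = (0, k) :: (((pvStarts rest).zip ((pvStarts rest).drop 1
                ++ [rest.length])).map (Prod.map (· + k) (· + k))) := by
          rw [hn, hpr]
          simp only [List.drop_one, List.tail_cons, List.map_cons, List.cons_append,
            List.zip_cons_cons]
          rw [show (S.map (· + k)) ++ [rest.length + k] = (S ++ [rest.length]).map (· + k) by
            simp]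
          rw [show ((0 + k) :: S.map (· + k)) = (0 :: S).map (· + k) by simp]
          rw [List.zip_map]
          simp
        have hfun : ∀ q : Nat × Nat,
            pvChunkB ((x :: xs).getD (Prod.map (· + k) (· + k) q).1 "")
                ((Prod.map (· + k) (· + k) q).2 - (Prod.map (· + k) (· + k) q).1)
              = pvChunkB (rest.getD q.1 "") (q.2 - q.1) := by
          intro q
          have h1 : (x :: xs).getD (q.1 + k) "" = rest.getD q.1 "" := by
            have h2 := pvGetD_shift (List.replicate k x) rest q.1
            rw [htok]
            simpa using h2
          simp only [Prod.map_fst, Prod.map_snd, h1]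
          congr 1
          omega
        rw [pvRender, hstarts', hzip, List.flatMap_cons, List.flatMap_map]
        have hhead : pvChunkB ((x :: xs).getD 0 "") (k - 0) = pvChunkB x (1 + k') := by
          simp [List.getD, hkdef, Nat.add_comm 1 k']
        rw [hhead, hG]
        congr 1
        have htail :
            ((pvStarts rest).zip ((pvStarts rest).drop 1 ++ [rest.length])).flatMap
              (fun q => pvChunkB ((x :: xs).getD (Prod.map (· + k) (· + k) q).1 "")
                ((Prod.map (· + k) (· + k) q).2 - (Prod.map (· + k) (· + k) q).1))
            = pvRender rest (pvStarts rest) rest.length := by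
          rw [pvRender]
          exact List.flatMap_congr (fun q _ => hfun q)
        rw [htail, ih rest hrlen]

-- ===== VERDICT (by name: the statement is the Claim_ definition above) =====
theorem collapse_fingerprint_py_spec : Claim_equal_collapse_fingerprint_py := by
  intro tokens _
  unfold Spec_collapse_fingerprint_py collapse_fingerprint_py
  rw [pvAlt_eq_render, pvRender_eq_pvG tokens.length tokens le_rfl]
  exact (pvLoopA_eq_pvG tokens.length tokens le_rfl []).trans (by simp)
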